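-- pv_equiv track=rewrite | github.com/JoYuKang/TIL_Python | pro/멀쩡한 사각형.py | solution
-- ===== SOURCE A (Python) =====
-- def solution(w,h):
--     answer = 1
--     min = h
--     max = w
--     value = 1
--     while value !=0:
--         value = max %min
--         max = min
--         min = value
--     answer = w * h -(w+h-max)
-- 		# 선이 지나가면서 겹치는 사각형 개수는 블록 단위로 규칙적이다.
-- 		#[2, 3] / [4, 6] / [6, 9] / [8, 12]
--
-- 		# 블록의 크기는  (w / gcd) x  (h / gcd)  이다.
-- 		# 한 블록 안에서는 (블록의 가로 크기 + 블록의 세로 크기 - 1) 수만큼의 사각형 위로 선이 지나간다.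
--
-- 		# 최대 공배수 구하는 방법
--     return answer
-- ===== SOURCE B (Python) =====
-- def solution(w, h):
--     # Same closed form as A, but the gcd is computed by a recursive
--     # Euclidean helper instead of A's sentinel-variable while loop.
--     def gcd(a, b):
--         r = a % b
--         if r == 0:
--             return b
--         return gcd(b, r)
--     return w * h - (w + h - gcd(w, h))
-- ===== Notes on version B (the rewrite author's own statement) =====
-- stated objective: simpler
-- what changed: Replaces A's three-variable sentinel while-loop (value/min/max juggling with a leftover 'answer = 1') by a plain two-argument recursive Euclidean gcd helper feeding the same closed form w*h-(w+h-g).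
import Mathlib
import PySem

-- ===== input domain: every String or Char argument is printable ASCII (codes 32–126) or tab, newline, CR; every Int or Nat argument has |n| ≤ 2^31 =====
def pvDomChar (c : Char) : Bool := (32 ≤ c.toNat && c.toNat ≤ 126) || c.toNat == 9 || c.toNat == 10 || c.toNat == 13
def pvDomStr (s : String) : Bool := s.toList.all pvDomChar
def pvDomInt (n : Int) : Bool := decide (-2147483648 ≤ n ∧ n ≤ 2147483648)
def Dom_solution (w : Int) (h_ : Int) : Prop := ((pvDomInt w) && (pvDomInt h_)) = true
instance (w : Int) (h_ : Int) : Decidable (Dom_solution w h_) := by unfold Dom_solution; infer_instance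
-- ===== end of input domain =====

-- ===== PORT A =====
-- B changes only the decomposition: A's sentinel while-loop becomes a recursive gcd helper.
-- Lemma needed by both ports' termination (floored mod shrinks in absolute value).
theorem pvFmodNatAbsLt (a b : Int) (h : b ≠ 0) : (PySem.Int.mod a b).natAbs < b.natAbs := by
  have he : 0 ≤ a % b := Int.emod_nonneg a h
  have hl : a % b < b.natAbs := Int.emod_lt a h
  show (a.fmod b).natAbs < b.natAbs
  rw [Int.fmod_eq_emod]
  split_ifs <;> omega

-- A's while loop, state (min, max, value):
--   while value != 0: value = max % min; max = min; min = value
def pvALoop (mn mx value : Int) : Int :=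
  if value = 0 then mx
  else if hmn : mn = 0 then 0   -- Python raises ZeroDivisionError here; excluded by Pre_
  else pvALoop (PySem.Int.mod mx mn) mn (PySem.Int.mod mx mn)
termination_by mn.natAbs
decreasing_by exact pvFmodNatAbsLt mx mn hmn

def solution (w : Int) (h_ : Int) : Int :=
  -- answer = 1; min = h; max = w; value = 1; loop; answer = w*h - (w+h-max)
  let mx := pvALoop h_ w 1
  w * h_ - (w + h_ - mx)

-- ===== PORT B =====
-- recursive Euclidean gcd: r = a % b; return b if r == 0 else gcd(b, r)
def pvGcdB (a b : Int) : Int :=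
  if hb : b = 0 then 0          -- Python raises ZeroDivisionError here; excluded by Pre_
  else
    let r := PySem.Int.mod a b
    if r = 0 then b else pvGcdB b r
termination_by b.natAbs
decreasing_by exact pvFmodNatAbsLt a b hb

def solution_alt (w : Int) (h_ : Int) : Int :=
  w * h_ - (w + h_ - pvGcdB w h_)

-- ===== PRECONDITION & SPEC =====
-- A (and B) divide by h first, so both raise ZeroDivisionError exactly when h = 0.
def Pre_solution (w : Int) (h_ : Int) : Prop := h_ ≠ 0
instance (w : Int) (h_ : Int) : Decidable (Pre_solution w h_) := by unfold Pre_solution; infer_instance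
def pvWitness_solution : Int × Int := (4, 6)
def Spec_solution (w : Int) (h_ : Int) (out : Int) : Prop := out = solution_alt w h_
instance (w : Int) (h_ : Int) (out : Int) : Decidable (Spec_solution w h_ out) := by unfold Spec_solution; infer_instance

-- ===== CLAIM (what is proved, stated in full; the proofs are below) =====
def Claim_equal_solution : Prop := ∀ (w : Int) (h_ : Int), Dom_solution w h_ → Pre_solution w h_ → Spec_solution w h_ (solution w h_)

-- ===== LEMMAS AND PROOFS =====
-- A's loop, once one division has happened, is exactly B's recursion.
theorem pvALoop_eq_gcdB (n : Nat) :
    ∀ (a mn : Int), mn ≠ 0 → (PySem.Int.mod a mn).natAbs ≤ n →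
      pvALoop (PySem.Int.mod a mn) mn (PySem.Int.mod a mn) = pvGcdB a mn := by
  induction n with
  | zero =>
    intro a mn hmn hle
    have hr : PySem.Int.mod a mn = 0 := by
      have := Int.natAbs_eq_zero.mp (Nat.le_zero.mp hle)
      exact this
    rw [pvALoop, pvGcdB]
    simp [hr, hmn]
  | succ n ih =>
    intro a mn hmn hle
    by_cases hr : PySem.Int.mod a mn = 0
    · rw [pvALoop, pvGcdB]; simp [hr, hmn]
    · rw [pvALoop, pvGcdB]
      simp only [hr, dif_neg hmn, if_false]
      have hlt : (PySem.Int.mod mn (PySem.Int.mod a mn)).natAbs ≤ n := by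
        have := pvFmodNatAbsLt mn (PySem.Int.mod a mn) hr
        omega
      exact ih mn (PySem.Int.mod a mn) hr hlt

-- ===== VERDICT (by name: the statement is the Claim_ definition above) =====
theorem solution_spec : Claim_equal_solution := by
  intro w h_ _ hpre
  show solution w h_ = solution_alt w h_
  unfold solution solution_alt
  have h1 : pvALoop h_ w 1 = pvGcdB w h_ := by
    rw [pvALoop]
    simp only [if_neg (by norm_num : (1:Int) ≠ 0), dif_neg hpre]
    exact pvALoop_eq_gcdB (PySem.Int.mod w h_).natAbs w h_ hpre le_rfl
  rw [h1]
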